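-- pv_equiv track=rewrite | github.com/Malivio/ComputerProgrammingUltimatePythonRepository | 06ListsAndLoops/Assignment/main.py | sum_with_skips
-- ===== SOURCE A (Python) =====
-- def sum_with_skips(arr):
--     n = 0
--     skip = False
--     for x in arr:
--         if x == -1:
--             if skip:
--                 skip = False
--             else:
--                 skip = True
--         elif not skip:
--             n += x
--     return n
-- ===== SOURCE B (Python) =====
-- def sum_with_skips(arr):
--     # partition at -1 markers into chunks; chunk index = number of -1s seen,
--     # so exactly the even-indexed chunks are the non-skipped elements
--     chunks = []
--     cur = []
--     for x in arr:
--         if x == -1: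
--             chunks.append(cur)
--             cur = []
--         else:
--             cur.append(x)
--     chunks.append(cur)
--     return sum(sum(c) for i, c in enumerate(chunks) if i % 2 == 0)
-- ===== Notes on version B (the rewrite author's own statement) =====
-- stated objective: alternative
-- what changed: B partitions the list into chunks split at each -1 marker and sums the even-indexed chunks, instead of A's single pass with a toggling skip flag and conditional accumulation.
import Mathlib
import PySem

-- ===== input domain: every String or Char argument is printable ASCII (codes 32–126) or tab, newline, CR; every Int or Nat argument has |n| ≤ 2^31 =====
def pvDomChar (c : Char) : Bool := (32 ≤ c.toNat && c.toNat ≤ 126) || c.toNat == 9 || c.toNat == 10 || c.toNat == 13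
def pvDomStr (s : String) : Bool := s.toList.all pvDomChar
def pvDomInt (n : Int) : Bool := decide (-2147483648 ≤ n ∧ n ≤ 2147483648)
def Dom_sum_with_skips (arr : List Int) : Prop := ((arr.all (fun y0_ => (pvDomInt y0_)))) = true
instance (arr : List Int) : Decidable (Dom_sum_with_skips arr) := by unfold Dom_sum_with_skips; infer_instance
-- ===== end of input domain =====

-- B partitions the input into chunks split at each -1 marker and sums the even-indexed
-- chunks, an alternative decomposition of A's toggling-skip single pass; same cost.


-- ===== PORT A =====
-- loop body of A: state (n, skip)
def pvStepA (s : Int × Bool) (x : Int) : Int × Bool :=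
  if x == -1 then
    (if s.2 then (s.1, false) else (s.1, true))
  else if !s.2 then (s.1 + x, s.2)
  else s

def sum_with_skips (arr : List Int) : Int :=
  (arr.foldl pvStepA (0, false)).1

-- ===== PORT B =====
-- loop body of B: state (chunks, cur)
def pvStepB (s : List (List Int) × List Int) (x : Int) : List (List Int) × List Int :=
  if x == -1 then (s.1 ++ [s.2], ([] : List Int)) else (s.1, s.2 ++ [x])

-- sum(sum(c) for i, c in enumerate(chunks) if i % 2 == 0)
def pvSumEven (chunks : List (List Int)) : Int :=
  (((PySem.List.enumerate chunks).filter (fun p => p.1 % 2 == 0)).map (fun p => p.2.sum)).sum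

def sum_with_skips_alt (arr : List Int) : Int :=
  let st := arr.foldl pvStepB (([] : List (List Int)), ([] : List Int))
  pvSumEven (st.1 ++ [st.2])

-- ===== PRECONDITION & SPEC =====
def Spec_sum_with_skips (arr : List Int) (out : Int) : Prop := out = sum_with_skips_alt arr
instance (arr : List Int) (out : Int) : Decidable (Spec_sum_with_skips arr out) := by unfold Spec_sum_with_skips; infer_instance

-- ===== CLAIM (what is proved, stated in full; the proofs are below) =====
def Claim_equal_sum_with_skips : Prop := ∀ (arr : List Int), Dom_sum_with_skips arr → Spec_sum_with_skips arr (sum_with_skips arr)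

-- ===== LEMMAS AND PROOFS =====

/-- Clean recursive specification both ports are reduced to. -/
def pvSpec : List Int → Bool → Int
  | [], _ => 0
  | x :: xs, s => if x = -1 then pvSpec xs (!s) else (if s then 0 else x) + pvSpec xs s

theorem foldA_eq (xs : List Int) : ∀ (n : Int) (s : Bool),
    (xs.foldl pvStepA (n, s)).1 = n + pvSpec xs s := by
  induction xs with
  | nil => intro n s; simp [pvSpec]
  | cons x xs ih =>
    intro n s
    rw [List.foldl_cons]
    by_cases hx : x = -1
    · have hb : (x == -1) = true := by simpa using hx
      cases s
      · rw [show pvStepA (n, false) x = (n, true) from by simp [pvStepA, hb], ih]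
        simp [pvSpec, hx]
      · rw [show pvStepA (n, true) x = (n, false) from by simp [pvStepA, hb], ih]
        simp [pvSpec, hx]
    · have hb : (x == -1) = false := by simpa using hx
      cases s
      · rw [show pvStepA (n, false) x = (n + x, false) from by simp [pvStepA, hb], ih]
        simp [pvSpec, hx]; ring
      · rw [show pvStepA (n, true) x = (n, true) from by simp [pvStepA, hb], ih]
        simp [pvSpec, hx]

theorem pvSumEven_append_single (cs : List (List Int)) (c : List Int) :
    pvSumEven (cs ++ [c]) = pvSumEven cs + (if cs.length % 2 = 0 then c.sum else 0) := by
  unfold pvSumEven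
  rw [PySem.List.enumerate_append]
  simp only [PySem.List.enumerate_cons, PySem.List.enumerate_nil, List.filter_append,
    List.map_append, List.sum_append, Int.zero_add]
  by_cases h : cs.length % 2 = 0
  · have hc : (((cs.length : Int)) % 2 == 0) = true := by simp; omega
    simp [List.filter, hc, h]
  · have hc : (((cs.length : Int)) % 2 == 0) = false := by simp; omega
    simp [List.filter, hc, h]

theorem foldB_eq (xs : List Int) : ∀ (cs : List (List Int)) (cur : List Int),
    (let st := xs.foldl pvStepB (cs, cur)
     pvSumEven (st.1 ++ [st.2]))
    = pvSumEven (cs ++ [cur]) + pvSpec xs (decide (cs.length % 2 = 1)) := by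
  induction xs with
  | nil => intro cs cur; simp [pvSpec]
  | cons x xs ih =>
    intro cs cur
    simp only [List.foldl_cons]
    by_cases hx : x = -1
    · have hb : (x == -1) = true := by simpa using hx
      rw [show pvStepB (cs, cur) x = (cs ++ [cur], []) from by simp [pvStepB, hb]]
      rw [ih]
      rw [pvSumEven_append_single (cs ++ [cur]) []]
      have hd : (decide ((cs ++ [cur]).length % 2 = 1)) = !decide (cs.length % 2 = 1) := by
        by_cases hp : cs.length % 2 = 1 <;> simp [hp, List.length_append] <;> omega
      rw [hd]
      simp [pvSpec, hx]
    · have hb : (x == -1) = false := by simpa using hx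
      rw [show pvStepB (cs, cur) x = (cs, cur ++ [x]) from by simp [pvStepB, hb]]
      rw [ih]
      rw [pvSumEven_append_single cs (cur ++ [x]), pvSumEven_append_single cs cur]
      by_cases h : cs.length % 2 = 0
      · have hd : (decide (cs.length % 2 = 1)) = false := by simp; omega
        simp [h, pvSpec, hx]; ring
      · have hd : (decide (cs.length % 2 = 1)) = true := by simp; omega
        simp [h, pvSpec, hx]

-- ===== VERDICT (by name: the statement is the Claim_ definition above) =====
theorem sum_with_skips_spec : Claim_equal_sum_with_skips := by
  intro arr _
  unfold Spec_sum_with_skips sum_with_skips sum_with_skips_alt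
  rw [foldA_eq, foldB_eq]
  simp [pvSumEven, PySem.List.enumerate_cons, List.filter]
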